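-- pv_equiv track=rewrite | github.com/tedba742/AOC21 | day10/day10part2.py | calculate_completion_score
-- ===== SOURCE A (Python) =====
-- def calculate_completion_score(stack):
--     completion_score = {
--         ')': 1,
--         ']': 2,
--         '}': 3,
--         '>': 4
--     }
--     score = 0
--     while stack:
--         char = stack.pop()
--         score = score * 5 + completion_score[char]
--     return score
-- ===== SOURCE B (Python) =====
-- def calculate_completion_score(stack):
--     completion_score = {
--         ')': 1,
--         ']': 2,
--         '}': 3,
--         '>': 4
--     }
--     return sum(completion_score[c] * 5**i for i, c in enumerate(stack))
-- ===== Notes on version B (the rewrite author's own statement) =====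
-- stated objective: simpler
-- what changed: Replaces the mutating pop-and-Horner while-loop with a closed-form positional sum over the stack in original order: element i contributes value*5**i (A pops back-to-front, which is exactly this weighting).
import Mathlib
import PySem

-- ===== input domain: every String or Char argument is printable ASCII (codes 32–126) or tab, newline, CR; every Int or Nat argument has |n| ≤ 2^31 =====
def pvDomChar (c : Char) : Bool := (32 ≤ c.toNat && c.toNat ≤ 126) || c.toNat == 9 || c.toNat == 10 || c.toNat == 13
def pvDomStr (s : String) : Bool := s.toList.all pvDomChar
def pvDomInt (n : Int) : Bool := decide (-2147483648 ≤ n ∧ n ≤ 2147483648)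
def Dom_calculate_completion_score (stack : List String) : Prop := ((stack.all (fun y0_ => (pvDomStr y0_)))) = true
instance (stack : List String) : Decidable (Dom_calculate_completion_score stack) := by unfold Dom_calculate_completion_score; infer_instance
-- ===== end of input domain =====

-- B replaces A's mutating pop-and-Horner loop with a closed-form positional sum
-- (element i of the stack contributes value * 5^i); B does not empty the argument
-- list as A does — the equivalence proved here is about the return value only.


-- ===== PORT A =====
-- the dict lookup completion_score[char]; total here, Pre_ guarantees the key is present
def csVal (c : String) : Int :=
  if c = ")" then 1 else if c = "]" then 2 else if c = "}" then 3 else if c = ">" then 4 else 0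

-- while stack: char = stack.pop(); score = score*5 + completion_score[char]
-- popping from the back = folding over the reversed list with the Horner step
def calculate_completion_score (stack : List String) : Int :=
  stack.reverse.foldl (fun score char => score * 5 + csVal char) 0

-- ===== PORT B =====
-- sum(completion_score[c] * 5**i for i, c in enumerate(stack))
def calculate_completion_score_alt (stack : List String) : Int :=
  (stack.zipIdx.map (fun p => csVal p.1 * 5 ^ p.2)).sum

-- ===== PRECONDITION & SPEC =====
-- Pre_ excludes stacks containing a string other than the four closing brackets:
-- there A (and B) raise KeyError on the dict lookup.
def Pre_calculate_completion_score (stack : List String) : Prop :=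
  ∀ s ∈ stack, s = ")" ∨ s = "]" ∨ s = "}" ∨ s = ">"
instance (stack : List String) : Decidable (Pre_calculate_completion_score stack) := by
  unfold Pre_calculate_completion_score; infer_instance
def pvWitness_calculate_completion_score : List String := [")", "]", "}", ">"]

def Spec_calculate_completion_score (stack : List String) (out : Int) : Prop := out = calculate_completion_score_alt stack
instance (stack : List String) (out : Int) : Decidable (Spec_calculate_completion_score stack out) := by unfold Spec_calculate_completion_score; infer_instance

-- ===== CLAIM (what is proved, stated in full; the proofs are below) =====
def Claim_equal_calculate_completion_score : Prop := ∀ (stack : List String), Dom_calculate_completion_score stack → Pre_calculate_completion_score stack → Spec_calculate_completion_score stack (calculate_completion_score stack)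

-- ===== LEMMAS AND PROOFS =====
-- Horner over the reversed list, with an arbitrary starting accumulator, equals the
-- positional sum plus the accumulator scaled by 5^length.
theorem horner_eq_positional (l : List String) (s : Int) :
    l.reverse.foldl (fun score char => score * 5 + csVal char) s
      = s * 5 ^ l.length + (l.zipIdx.map (fun p => csVal p.1 * 5 ^ p.2)).sum := by
  induction l generalizing s with
  | nil => simp
  | cons c t ih =>
    simp only [List.reverse_cons, List.foldl_append, List.foldl_cons, List.foldl_nil,
      List.zipIdx_cons', List.map_cons, List.map_map, List.sum_cons, List.length_cons]
    rw [ih]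
    have : (t.zipIdx.map ((fun p => csVal p.1 * 5 ^ p.2) ∘
        Prod.map id fun x => x + 1)).sum
        = 5 * (t.zipIdx.map (fun p => csVal p.1 * 5 ^ p.2)).sum := by
      rw [← List.sum_map_mul_left]
      congr 1
      apply List.map_congr_left
      intro p _
      simp [Function.comp, Prod.map, pow_succ]
      ring
    rw [this]
    ring

-- ===== VERDICT (by name: the statement is the Claim_ definition above) =====
theorem calculate_completion_score_spec : Claim_equal_calculate_completion_score := by
  intro stack _ _
  unfold Spec_calculate_completion_score calculate_completion_score calculate_completion_score_alt
  rw [horner_eq_positional]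
  simp
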